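-- pv_equiv track=rewrite | github.com/arthurarty/data_structures | hacker_rank_solves/items_in_containers.py | find_number_of_items
-- ===== SOURCE A (Python) =====
-- def find_number_of_items(input_list):
--     temp_hold = []
--     is_open = False
--     counter = 0
--     for ii in input_list:
--         if ii == '|':
--             is_open = True
--             if counter != 0:
--                 temp_hold.append(counter)
--             counter = 0
--             continue
--         if is_open and ii == '*':
--             counter += 1
--     return sum(temp_hold)
-- ===== SOURCE B (Python) =====
-- def find_number_of_items(input_list):
--     def after_first_bar(items):
--         it = iter(items)
--         for x in it:
--             if x == '|':
--                 return list(it)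
--         return None
--
--     mid = after_first_bar(input_list)
--     if mid is None:
--         return 0
--     tail = after_first_bar(reversed(mid))
--     if tail is None:
--         return 0
--     return tail.count('*')
-- ===== Notes on version B (the rewrite author's own statement) =====
-- stated objective: simpler
-- what changed: B replaces A's stateful single pass (is_open flag, per-segment counter list, flush-on-bar, final sum) by a direct decomposition: drop everything up to and including the first '|', drop everything up to and including the last '|' (via reverse), and count '*' in what remains.
import Mathlib
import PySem

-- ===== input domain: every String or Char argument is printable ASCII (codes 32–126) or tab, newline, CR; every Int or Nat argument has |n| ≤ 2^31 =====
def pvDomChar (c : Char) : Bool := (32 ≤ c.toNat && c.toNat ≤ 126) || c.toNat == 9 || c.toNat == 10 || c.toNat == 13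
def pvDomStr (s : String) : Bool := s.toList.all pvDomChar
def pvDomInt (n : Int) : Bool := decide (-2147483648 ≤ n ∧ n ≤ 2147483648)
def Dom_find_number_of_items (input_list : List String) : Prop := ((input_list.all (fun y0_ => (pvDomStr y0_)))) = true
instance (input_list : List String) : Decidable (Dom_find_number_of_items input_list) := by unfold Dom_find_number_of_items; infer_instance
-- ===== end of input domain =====

-- B replaces A's stateful single pass (is_open flag, per-segment counters, flush-on-bar, final sum)
-- by a direct decomposition: drop up to and including the first '|', then up to and including the
-- last '|' (via reverse), and count '*' in the remainder. Objective: simpler.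

-- ===== PORT A =====
-- loop body of A's for-loop: state = (temp_hold, is_open, counter)
def aStep (s : List Int × Bool × Int) (ii : String) : List Int × Bool × Int :=
  if ii = "|" then
    ((if s.2.2 ≠ 0 then s.1 ++ [s.2.2] else s.1), true, 0)
  else if s.2.1 && ii = "*" then
    (s.1, s.2.1, s.2.2 + 1)
  else s

def find_number_of_items (input_list : List String) : Int :=
  (input_list.foldl aStep ([], false, 0)).1.sum

-- ===== PORT B =====
-- after_first_bar: the elements after the first '|', or none if there is no '|'
def afterFirstBar (items : List String) : Option (List String) :=
  match items with
  | [] => none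
  | x :: xs => if x = "|" then some xs else afterFirstBar xs

def find_number_of_items_alt (input_list : List String) : Int :=
  match afterFirstBar input_list with
  | none => 0
  | some mid =>
    match afterFirstBar mid.reverse with
    | none => 0
    | some tail => PySem.List.count tail "*"

-- ===== PRECONDITION & SPEC =====
def Spec_find_number_of_items (input_list : List String) (out : Int) : Prop := out = find_number_of_items_alt input_list
instance (input_list : List String) (out : Int) : Decidable (Spec_find_number_of_items input_list out) := by unfold Spec_find_number_of_items; infer_instance

-- ===== CLAIM (what is proved, stated in full; the proofs are below) =====
def Claim_equal_find_number_of_items : Prop := ∀ (input_list : List String), Dom_find_number_of_items input_list → Spec_find_number_of_items input_list (find_number_of_items input_list)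

-- ===== LEMMAS AND PROOFS =====

-- stars strictly before the last '|' of m (0 when m has no '|'): the common characterisation
def pvG : List String → Int
  | [] => 0
  | x :: m' => if "|" ∈ m' then (if x = "*" then (1 : Int) else 0) + pvG m' else 0

theorem pvSum_flush (h : List Int) (c : Int) :
    (if c ≠ 0 then h ++ [c] else h).sum = h.sum + c := by
  by_cases hc : c = 0 <;> simp [hc]

-- open-phase invariant of A's fold
theorem pvOpen (m : List String) : ∀ (h : List Int) (c : Int),
    (m.foldl aStep (h, true, c)).1.sum
      = h.sum + (if "|" ∈ m then c + pvG m else 0) := by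
  induction m with
  | nil => intro h c; simp
  | cons x m' ih =>
    intro h c
    by_cases hx : x = "|"
    · subst hx
      have hstep : aStep (h, true, c) "|" = ((if c ≠ 0 then h ++ [c] else h), true, 0) := by
        simp [aStep]
      rw [List.foldl_cons, hstep, ih, pvSum_flush]
      simp only [pvG, List.mem_cons, true_or, if_pos]
      by_cases hm : "|" ∈ m'
      · simp [hm]; ring
      · simp [hm]
    · have hbar : ("|" ∈ x :: m') ↔ ("|" ∈ m') := by
        simp [List.mem_cons, eq_comm, hx]
      by_cases hs : x = "*"
      · subst hs
        have hstep : aStep (h, true, c) "*" = (h, true, c + 1) := by simp [aStep]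
        rw [List.foldl_cons, hstep, ih]
        simp only [pvG, hbar]
        by_cases hm : "|" ∈ m'
        · simp [hm]; ring
        · simp [hm]
      · have hstep : aStep (h, true, c) x = (h, true, c) := by simp [aStep, hx, hs]
        rw [List.foldl_cons, hstep, ih]
        simp only [pvG, hbar]
        by_cases hm : "|" ∈ m' <;> simp [hm, hs]

-- closed phase: before the first '|' nothing changes
theorem pvClosed (l : List String) :
    find_number_of_items l
      = match afterFirstBar l with
        | none => 0
        | some m => if "|" ∈ m then pvG m else 0 := by
  induction l with
  | nil => rfl
  | cons x l' ih =>
    by_cases hx : x = "|"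
    · subst hx
      show ((l'.foldl aStep ([], true, 0)).1.sum) = _
      rw [pvOpen l' [] 0]
      simp [afterFirstBar]
    · have : aStep ([], false, 0) x = ([], false, 0) := by
        simp [aStep, hx]
      show ((l'.foldl aStep (aStep ([], false, 0) x)).1.sum) = _
      rw [this]
      rw [show ((l'.foldl aStep ([], false, 0)).1.sum) = find_number_of_items l' from rfl] at *
      rw [ih]
      simp [afterFirstBar, hx]

theorem pvAfterAppend (l : List String) (x : String) :
    afterFirstBar (l ++ [x])
      = match afterFirstBar l with
        | some t => some (t ++ [x])
        | none => if x = "|" then some [] else none := by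
  induction l with
  | nil => simp [afterFirstBar]
  | cons y l' ih =>
    by_cases hy : y = "|"
    · simp [afterFirstBar, hy]
    · simp only [List.cons_append, afterFirstBar, if_neg hy, ih]

theorem pvAfter_none_iff (l : List String) : afterFirstBar l = none ↔ "|" ∉ l := by
  induction l with
  | nil => simp [afterFirstBar]
  | cons z zs ih =>
    by_cases hz : z = "|"
    · simp [afterFirstBar, hz]
    · simp [afterFirstBar, hz, ih, eq_comm]

theorem pvCount_append (t : List String) (x : String) :
    ((PySem.List.count (t ++ [x]) "*" : Nat) : Int)
      = ((PySem.List.count t "*" : Nat) : Int) + (if x = "*" then 1 else 0) := by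
  by_cases hx : x = "*" <;> simp [PySem.List.count, List.count_append, hx]

-- B's value on the post-first-bar segment equals pvG
theorem pvBsegment (m : List String) :
    (match afterFirstBar m.reverse with
     | none => (0 : Int)
     | some tail => PySem.List.count tail "*")
      = if "|" ∈ m then pvG m else 0 := by
  induction m with
  | nil => simp [afterFirstBar]
  | cons x m' ih =>
    rw [List.reverse_cons, pvAfterAppend]
    by_cases hm : "|" ∈ m'
    · obtain ⟨t, ht⟩ : ∃ t, afterFirstBar m'.reverse = some t := by
        cases hafb : afterFirstBar m'.reverse with
        | some t => exact ⟨t, rfl⟩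
        | none =>
          exact absurd (by simpa using hm) (by simpa using (pvAfter_none_iff m'.reverse).mp hafb)
      rw [ht]; rw [ht] at ih
      simp only [hm, if_pos] at ih
      have hmem : ("|" ∈ x :: m') := List.mem_cons_of_mem _ hm
      simp only [hmem, if_pos, pvG, hm]
      show ((PySem.List.count (t ++ [x]) "*" : Nat) : Int) = _
      rw [pvCount_append, ih]
      ring
    · have hnone : afterFirstBar m'.reverse = none := by
        rw [pvAfter_none_iff]
        simpa using hm
      rw [hnone]; rw [hnone] at ih
      by_cases hx : x = "|"
      · simp [hx, pvG, hm, PySem.List.count]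
      · simp [hx, List.mem_cons, eq_comm, hm]

-- ===== VERDICT (by name: the statement is the Claim_ definition above) =====
theorem find_number_of_items_spec : Claim_equal_find_number_of_items := by
  intro l _
  show find_number_of_items l = find_number_of_items_alt l
  rw [pvClosed]
  unfold find_number_of_items_alt
  cases hafb : afterFirstBar l with
  | none => rfl
  | some m => exact (pvBsegment m).symm
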